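-- pv_equiv track=rewrite | github.com/Jeothen/Algorithm | Codility/PermCheck.py | solution
-- ===== SOURCE A (Python) =====
-- def solution(A):
--     A = set(A)
--     A = sorted(A)
--     idx = 0
--     while(idx < len(A)):
--         if (A[idx] > 0):
--             val = 1
--             while(idx < len(A) and A[idx] == val):
--                 val+=1
--                 idx+=1
--             return val
--         else : idx += 1
--     return 1
-- ===== SOURCE B (Python) =====
-- def solution(A):
--     n = len(A)
--     present = [False] * (n + 2)
--     for x in A:
--         if 1 <= x <= n:
--             present[x] = True
--     k = 1
--     while present[k]:
--         k += 1
--     return k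
-- ===== Notes on version B (the rewrite author's own statement) =====
-- stated objective: faster
-- what changed: Replaces dedup+sort+scan of the sorted array with a single pass marking a value-indexed presence table of size n+2, then returning the first unmarked index (first missing positive).
import Mathlib
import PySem

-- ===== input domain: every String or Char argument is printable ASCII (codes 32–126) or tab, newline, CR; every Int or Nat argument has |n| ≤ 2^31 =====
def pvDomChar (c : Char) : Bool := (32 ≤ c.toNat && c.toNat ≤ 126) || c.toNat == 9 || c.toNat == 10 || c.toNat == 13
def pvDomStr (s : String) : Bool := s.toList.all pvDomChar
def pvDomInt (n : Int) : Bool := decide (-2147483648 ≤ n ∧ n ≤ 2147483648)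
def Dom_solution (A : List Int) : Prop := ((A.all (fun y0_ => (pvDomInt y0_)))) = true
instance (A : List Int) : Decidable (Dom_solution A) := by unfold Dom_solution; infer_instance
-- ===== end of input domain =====

-- B replaces A's dedup+sort+scan with a one-pass value-indexed presence table (first missing positive); return values proved equal.

-- ===== PORT A =====
-- inner while: 'while(idx < len(A) and A[idx] == val): val+=1; idx+=1' then 'return val'
def innerA (xs : List Int) (idx : Nat) (val : Int) : Int :=
  if h : idx < xs.length then
    if xs.getD idx 0 = val then innerA xs (idx + 1) (val + 1) else val
  else val
termination_by xs.length - idx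

-- outer while over idx
def outerA (xs : List Int) (idx : Nat) : Int :=
  if h : idx < xs.length then
    if xs.getD idx 0 > 0 then innerA xs idx 1
    else outerA xs (idx + 1)
  else 1
termination_by xs.length - idx

def solution (A : List Int) : Int :=
  outerA (PySem.List.sorted (PySem.Set.ofList A) (fun x => x) false) 0

-- ===== PORT B =====
-- 'for x in A: if 1 <= x <= n: present[x] = True' over present = [False]*(n+2)
def markB (A : List Int) (n : Nat) : List Bool :=
  A.foldl (fun p x => if 1 ≤ x ∧ x ≤ (n : Int) then p.set x.toNat true else p)
    (List.replicate (n + 2) false)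

-- 'k = 1; while present[k]: k += 1; return k'  (the final bound check is unreachable in Python)
def findB (p : List Bool) (k : Nat) : Nat :=
  if h : k < p.length then
    if p.getD k false then findB p (k + 1) else k
  else k
termination_by p.length - k

def solution_alt (A : List Int) : Int :=
  (findB (markB A A.length) 1 : Int)

-- ===== PRECONDITION & SPEC =====
def Spec_solution (A : List Int) (out : Int) : Prop := out = solution_alt A
instance (A : List Int) (out : Int) : Decidable (Spec_solution A out) := by unfold Spec_solution; infer_instance

-- ===== CLAIM (what is proved, stated in full; the proofs are below) =====
def Claim_equal_solution : Prop := ∀ (A : List Int), Dom_solution A → Spec_solution A (solution A)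

-- ===== LEMMAS AND PROOFS =====

-- Both programs return the least integer r ≥ 1 with r ∉ A.
def IsMex (A : List Int) (r : Int) : Prop :=
  1 ≤ r ∧ (∀ j : Int, 1 ≤ j → j < r → j ∈ A) ∧ r ∉ A

theorem isMex_unique {A : List Int} {r s : Int} (hr : IsMex A r) (hs : IsMex A s) : r = s := by
  obtain ⟨hr1, hr2, hr3⟩ := hr
  obtain ⟨hs1, hs2, hs3⟩ := hs
  by_contra hne
  rcases lt_or_gt_of_ne hne with h | h
  · exact hr3 (hs2 r hr1 h)
  · exact hs3 (hr2 s hs1 h)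

theorem val_not_mem (xs : List Int) (idx : Nat) (val : Int)
    (hsort : xs.Pairwise (· < ·))
    (hlo : ∀ p : Nat, p < idx → xs.getD p 0 < val)
    (hup : idx < xs.length → xs.getD idx 0 ≠ val ∧ val ≤ xs.getD idx 0) : val ∉ xs := by
  intro hmem
  obtain ⟨q, hq, hqv⟩ := List.mem_iff_getElem.mp hmem
  have hmono := List.pairwise_iff_getElem.mp hsort
  rcases lt_trichotomy q idx with h | h | h
  · have h' := hlo q h
    rw [List.getD_eq_getElem _ _ hq] at h'
    omega
  · subst h
    obtain ⟨hne, hle⟩ := hup hq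
    rw [List.getD_eq_getElem _ _ hq] at hne hle
    omega
  · have hidx : idx < xs.length := lt_trans h hq
    obtain ⟨hne, hle⟩ := hup hidx
    rw [List.getD_eq_getElem _ _ hidx] at hne hle
    have := hmono idx q hidx hq h
    omega

theorem innerA_mex (xs : List Int) (idx : Nat) (val : Int)
    (hsort : xs.Pairwise (· < ·))
    (hv : 1 ≤ val)
    (hpr : ∀ j : Int, 1 ≤ j → j < val → j ∈ xs)
    (hlo : ∀ p : Nat, p < idx → xs.getD p 0 < val)
    (hge : idx < xs.length → val ≤ xs.getD idx 0) :
    IsMex xs (innerA xs idx val) := by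
  have hmono := List.pairwise_iff_getElem.mp hsort
  have key : ∀ m idx val, xs.length - idx ≤ m → 1 ≤ val →
      (∀ j : Int, 1 ≤ j → j < val → j ∈ xs) →
      (∀ p : Nat, p < idx → xs.getD p 0 < val) →
      (idx < xs.length → val ≤ xs.getD idx 0) →
      IsMex xs (innerA xs idx val) := by
    intro m
    induction m with
    | zero =>
      intro idx val hm hv hpr hlo hge
      rw [innerA, dif_neg (by omega)]
      exact ⟨hv, hpr, val_not_mem xs idx val hsort hlo (fun h => absurd h (by omega))⟩
    | succ m ih =>
      intro idx val hm hv hpr hlo hge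
      rw [innerA]
      by_cases h : idx < xs.length
      · rw [dif_pos h]
        by_cases he : xs.getD idx 0 = val
        · rw [if_pos he]
          refine ih (idx + 1) (val + 1) (by omega) (by omega) ?_ ?_ ?_
          · intro j hj1 hj2
            rcases lt_or_eq_of_le (by omega : j ≤ val) with h' | h'
            · exact hpr j hj1 h'
            · subst h'
              rw [← he, List.getD_eq_getElem _ _ h]
              exact List.getElem_mem h
          · intro p hp
            rcases Nat.lt_or_ge p idx with h' | h'
            · have := hlo p h'; omega
            · have : p = idx := by omega
              subst this; omega
          · intro h'
            have := hmono idx (idx + 1) h h' (by omega)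
            rw [List.getD_eq_getElem _ _ h, List.getD_eq_getElem _ _ h'] at *
            omega
        · rw [if_neg he]
          exact ⟨hv, hpr, val_not_mem xs idx val hsort hlo (fun hh => ⟨he, hge hh⟩)⟩
      · rw [dif_neg h]
        exact ⟨hv, hpr, val_not_mem xs idx val hsort hlo (fun hh => absurd hh h)⟩
  exact key (xs.length - idx) idx val (le_refl _) hv hpr hlo hge

theorem outerA_mex (xs : List Int) (idx : Nat)
    (hsort : xs.Pairwise (· < ·))
    (hneg : ∀ p : Nat, p < idx → xs.getD p 0 ≤ 0) :
    IsMex xs (outerA xs idx) := by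
  have key : ∀ m idx, xs.length - idx ≤ m →
      (∀ p : Nat, p < idx → xs.getD p 0 ≤ 0) → IsMex xs (outerA xs idx) := by
    intro m
    induction m with
    | zero =>
      intro idx hm hneg
      rw [outerA, dif_neg (by omega)]
      refine ⟨le_refl _, fun j h1 h2 => absurd h2 (by omega), ?_⟩
      exact val_not_mem xs idx 1 hsort (fun p hp => by have := hneg p hp; omega)
        (fun h => absurd h (by omega))
    | succ m ih =>
      intro idx hm hneg
      rw [outerA]
      by_cases h : idx < xs.length
      · rw [dif_pos h]
        by_cases hpos : xs.getD idx 0 > 0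
        · rw [if_pos hpos]
          exact innerA_mex xs idx 1 hsort (le_refl _)
            (fun j h1 h2 => absurd h2 (by omega))
            (fun p hp => by have := hneg p hp; omega)
            (fun _ => by omega)
        · rw [if_neg hpos]
          refine ih (idx + 1) (by omega) ?_
          intro p hp
          rcases Nat.lt_or_ge p idx with h' | h'
          · exact hneg p h'
          · have : p = idx := by omega
            subst this
            omega
      · rw [dif_neg h]
        refine ⟨le_refl _, fun j h1 h2 => absurd h2 (by omega), ?_⟩
        exact val_not_mem xs idx 1 hsort (fun p hp => by have := hneg p hp; omega)
          (fun hh => absurd hh h)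
  exact key (xs.length - idx) idx (le_refl _) hneg

theorem solution_mex (A : List Int) : IsMex A (solution A) := by
  unfold solution
  have hsort := PySem.List.sorted_ofList_pairwise_lt (κ := Int) A
  have hmem : ∀ x : Int, x ∈ PySem.List.sorted (PySem.Set.ofList A) (fun x => x) false ↔ x ∈ A := by
    intro x
    rw [PySem.List.mem_sorted]
    exact PySem.Set.mem_ofList A x
  obtain ⟨h1, h2, h3⟩ := outerA_mex (PySem.List.sorted (PySem.Set.ofList A) (fun x => x) false) 0
    hsort (fun p hp => absurd hp (by omega))
  exact ⟨h1, fun j hj1 hj2 => (hmem j).mp (h2 j hj1 hj2), fun hc => h3 ((hmem _).mpr hc)⟩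

theorem mark_foldl_length (A : List Int) (n : Nat) (p : List Bool) :
    (A.foldl (fun p x => if 1 ≤ x ∧ x ≤ (n : Int) then p.set x.toNat true else p) p).length
      = p.length := by
  induction A generalizing p with
  | nil => rfl
  | cons x A ih =>
    simp only [List.foldl_cons]
    rw [ih]
    split <;> simp

theorem markB_length (A : List Int) (n : Nat) : (markB A n).length = n + 2 := by
  unfold markB
  rw [mark_foldl_length]
  simp

theorem mark_foldl_getD (n : Nat) (A : List Int) (p : List Bool) (i : Nat) (hi : i < p.length) :
    (A.foldl (fun p x => if 1 ≤ x ∧ x ≤ (n : Int) then p.set x.toNat true else p) p).getD i false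
      = (p.getD i false || decide (1 ≤ (i : Int) ∧ (i : Int) ≤ (n : Int) ∧ (i : Int) ∈ A)) := by
  induction A generalizing p with
  | nil => simp
  | cons x A ih =>
    simp only [List.foldl_cons]
    rw [ih]
    · simp only [List.mem_cons]
      by_cases hc : 1 ≤ x ∧ x ≤ (n : Int)
      · rw [if_pos hc]
        by_cases hxi : x.toNat = i
        · have hix : (i : Int) = x := by omega
          have : (p.set x.toNat true).getD i false = true := by
            rw [hxi, List.getD_eq_getElem _ _ (by simpa using hi)]
            simp
          rw [this]
          simp [hix]
          omega
        · have : (p.set x.toNat true).getD i false = p.getD i false := by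
            rw [List.getD_eq_getElem _ _ (by simpa using hi), List.getD_eq_getElem _ _ hi]
            simp [hxi]
          rw [this]
          have hne : ¬ (i : Int) = x := by omega
          simp [hne]
      · rw [if_neg hc]
        by_cases hix : (i : Int) = x
        · have h' : ¬ ((1:Int) ≤ x) ∨ ¬ (x ≤ (n : Int)) := by omega
          rcases h' with h | h <;> simp [hix, h]
        · simp [hix]
    · split <;> simpa using hi

theorem markB_getD (A : List Int) (n : Nat) (i : Nat) (hi : i < n + 2) :
    (markB A n).getD i false = decide (1 ≤ (i : Int) ∧ (i : Int) ≤ (n : Int) ∧ (i : Int) ∈ A) := by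
  unfold markB
  rw [mark_foldl_getD n A _ i (by simpa using hi)]
  simp

theorem findB_spec (p : List Bool) (k : Nat)
    (hex : ∃ j : Nat, k ≤ j ∧ j < p.length ∧ p.getD j false = false) :
    k ≤ findB p k ∧ findB p k < p.length ∧ p.getD (findB p k) false = false ∧
      ∀ j : Nat, k ≤ j → j < findB p k → p.getD j false = true := by
  induction k using findB.induct (p := p) with
  | case1 k h ht ih =>
    rw [findB, dif_pos h, if_pos ht]
    have hex' : ∃ j : Nat, k + 1 ≤ j ∧ j < p.length ∧ p.getD j false = false := by
      obtain ⟨j, hj1, hj2, hj3⟩ := hex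
      refine ⟨j, ?_, hj2, hj3⟩
      rcases Nat.eq_or_lt_of_le hj1 with rfl | h'
      · rw [ht] at hj3; exact absurd hj3 (by simp)
      · omega
    obtain ⟨i1, i2, i3, i4⟩ := ih hex'
    refine ⟨by omega, i2, i3, ?_⟩
    intro j hj1 hj2
    rcases Nat.eq_or_lt_of_le hj1 with rfl | h'
    · exact ht
    · exact i4 j h' hj2
  | case2 k h ht =>
    rw [findB, dif_pos h, if_neg ht]
    exact ⟨le_refl _, h, by simpa using ht, fun j h1 h2 => by omega⟩
  | case3 k h =>
    obtain ⟨j, hj1, hj2, _⟩ := hex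
    omega

theorem solution_alt_mex (A : List Int) : IsMex A (solution_alt A) := by
  unfold solution_alt
  have hlen := markB_length A A.length
  have hval := markB_getD A A.length
  have hex : ∃ j : Nat, 1 ≤ j ∧ j < (markB A A.length).length ∧
      (markB A A.length).getD j false = false := by
    refine ⟨A.length + 1, by omega, by omega, ?_⟩
    rw [hval (A.length + 1) (by omega)]
    simp only [decide_eq_false_iff_not]
    rintro ⟨-, h2, -⟩
    omega
  obtain ⟨r1, r2, r3, r4⟩ := findB_spec (markB A A.length) 1 hex
  set r := findB (markB A A.length) 1 with hr
  have hrlt : r < A.length + 2 := by omega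
  have hmemlt : ∀ j : Int, 1 ≤ j → j < (r : Int) → j ∈ A := by
    intro j hj1 hj2
    have hjn : j = ((j.toNat : Nat) : Int) := by omega
    have h4 := r4 j.toNat (by omega) (by omega)
    rw [hval j.toNat (by omega)] at h4
    have := of_decide_eq_true h4
    rw [hjn]
    exact this.2.2
  refine ⟨by exact_mod_cast r1, hmemlt, ?_⟩
  rcases Nat.lt_or_ge r (A.length + 1) with hcase | hcase
  · -- r ≤ n: the table entry for r is false, so r ∉ A
    intro hc
    rw [hval r hrlt] at r3
    simp only [decide_eq_false_iff_not] at r3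
    exact r3 ⟨by exact_mod_cast r1, by omega, hc⟩
  · -- r = n + 1: pigeonhole, A cannot contain all of 1..n+1
    have hreq : r = A.length + 1 := by omega
    intro hc
    have hsub : ((List.range (A.length + 1)).map (fun m : Nat => ((m : Int) + 1))) ⊆ A := by
      intro y hy
      obtain ⟨m, hm, rfl⟩ := List.mem_map.mp hy
      rw [List.mem_range] at hm
      rcases Nat.lt_or_ge m A.length with h' | h'
      · exact hmemlt _ (by omega) (by omega)
      · have hmA : ((m : Int) + 1) = (r : Int) := by omega
        rw [hmA]
        exact hc
    have hnodup : ((List.range (A.length + 1)).map (fun m : Nat => ((m : Int) + 1))).Nodup := by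
      refine List.Nodup.map ?_ (List.nodup_range)
      intro a b hab
      simp only at hab
      omega
    have hle := (List.subperm_of_subset hnodup hsub).length_le
    simp at hle

-- ===== VERDICT (by name: the statement is the Claim_ definition above) =====
theorem solution_spec : Claim_equal_solution := by
  intro A _
  unfold Spec_solution
  exact isMex_unique (solution_mex A) (solution_alt_mex A)
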